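-- pv_equiv track=rewrite | github.com/harry720320/account-plan-agent-english | dynamic_questioning.py | _prioritize_questions
-- ===== SOURCE A (Python) =====
-- from typing import Dict, List, Any, Optional
--
-- def _prioritize_questions(
--                         intelligent_questions: List[Dict[str, Any]],
--                         follow_up_questions: List[str]) -> List[Dict[str, Any]]:
--     """Question priority sorting"""
--     prioritized = []
--
--     # Add intelligent questions
--     for q in intelligent_questions:
--         if isinstance(q, dict):
--             prioritized.append({
--                 "question": q.get("question", ""),
--                 "type": "intelligent",
--                 "category": q.get("category", "Other"),
--                 "priority": q.get("priority", "medium"),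
--                 "value": q.get("value", "Medium")
--             })
--
--     # Add derived questions
--     for q in follow_up_questions:
--         prioritized.append({
--             "question": q,
--             "type": "follow_up",
--             "category": "Derived",
--             "priority": "medium",
--             "value": "Medium"
--         })
--
--     # Sort by priority
--     priority_order = {"high": 1, "medium": 2, "low": 3}
--     prioritized.sort(key=lambda x: priority_order.get(x["priority"], 2))
--
--     return prioritized[:10]  # Return top 10 questions
-- ===== SOURCE B (Python) =====
-- from typing import Dict, List, Any
--
-- def _prioritize_questions(
--                         intelligent_questions: List[Dict[str, Any]],
--                         follow_up_questions: List[str]) -> List[Dict[str, Any]]: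
--     """Same records; a single stable three-bucket distribution replaces the sort."""
--     records = [{
--         "question": q.get("question", ""),
--         "type": "intelligent",
--         "category": q.get("category", "Other"),
--         "priority": q.get("priority", "medium"),
--         "value": q.get("value", "Medium"),
--     } for q in intelligent_questions if isinstance(q, dict)]
--     records += [{
--         "question": q,
--         "type": "follow_up",
--         "category": "Derived",
--         "priority": "medium",
--         "value": "Medium",
--     } for q in follow_up_questions]
--
--     high, medium, low = [], [], []
--     for r in records:
--         p = r["priority"]
--         if p == "high":
--             high.append(r)
--         elif p == "low":
--             low.append(r)
--         else:
--             medium.append(r)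
--     return (high + medium + low)[:10]
-- ===== Notes on version B (the rewrite author's own statement) =====
-- stated objective: alternative
-- what changed: Replaces the stable sort over the 3-valued priority key by a single-pass stable distribution into high/medium/low buckets concatenated in order, and builds the records with comprehensions instead of append loops.
import Mathlib
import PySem

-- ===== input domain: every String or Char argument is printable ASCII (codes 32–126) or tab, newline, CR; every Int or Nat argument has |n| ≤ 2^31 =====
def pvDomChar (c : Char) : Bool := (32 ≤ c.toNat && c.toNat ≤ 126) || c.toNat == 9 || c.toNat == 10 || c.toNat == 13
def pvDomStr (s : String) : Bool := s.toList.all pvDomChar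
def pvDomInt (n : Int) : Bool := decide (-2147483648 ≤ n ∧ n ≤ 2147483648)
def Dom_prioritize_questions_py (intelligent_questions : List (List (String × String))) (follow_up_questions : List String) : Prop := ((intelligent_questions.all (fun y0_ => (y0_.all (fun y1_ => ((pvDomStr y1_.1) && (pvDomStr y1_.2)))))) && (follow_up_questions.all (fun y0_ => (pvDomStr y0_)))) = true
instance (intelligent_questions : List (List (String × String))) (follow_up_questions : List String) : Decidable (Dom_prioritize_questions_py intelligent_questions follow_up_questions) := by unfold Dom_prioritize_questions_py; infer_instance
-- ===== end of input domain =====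

-- B replaces A's stable sort over the 3-valued priority key by a single stable pass
-- distributing records into high/medium/low buckets concatenated in order (objective: alternative).

-- ===== PORT A =====
-- record built from an intelligent question dict (dict literal with distinct keys, insertion order)
def pvMkIntel (q : List (String × String)) : List (String × String) :=
  [("question", (PySem.Dict.mk q).getD "question" ""),
   ("type", "intelligent"),
   ("category", (PySem.Dict.mk q).getD "category" "Other"),
   ("priority", (PySem.Dict.mk q).getD "priority" "medium"),
   ("value", (PySem.Dict.mk q).getD "value" "Medium")]

-- record built from a follow-up question string
def pvMkFollow (q : String) : List (String × String) :=
  [("question", q), ("type", "follow_up"), ("category", "Derived"),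
   ("priority", "medium"), ("value", "Medium")]

-- priority_order = {"high": 1, "medium": 2, "low": 3}
def pvPriorityOrder : PySem.Dict String Int := PySem.Dict.mk [("high", 1), ("medium", 2), ("low", 3)]

-- x["priority"] never fails (every record carries the key); `.getD "" ` is that exact lookup
def pvKey (x : List (String × String)) : Int :=
  pvPriorityOrder.getD (((PySem.Dict.mk x).get? "priority").getD "") 2

def prioritize_questions_py (intelligent_questions : List (List (String × String))) (follow_up_questions : List String) : List (List (String × String)) :=
  -- isinstance(q, dict) is always true under the type convention (every q is a dict)
  let prioritized := intelligent_questions.foldl (fun acc q => acc ++ [pvMkIntel q]) []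
  let prioritized := follow_up_questions.foldl (fun acc q => acc ++ [pvMkFollow q]) prioritized
  (PySem.List.sorted prioritized pvKey false).take 10

-- ===== PORT B =====
def prioritize_questions_py_alt (intelligent_questions : List (List (String × String))) (follow_up_questions : List String) : List (List (String × String)) :=
  let records := intelligent_questions.map pvMkIntel ++ follow_up_questions.map pvMkFollow
  let buckets := records.foldl
    (fun (acc : List (List (String × String)) × List (List (String × String)) × List (List (String × String))) r =>
      let p := ((PySem.Dict.mk r).get? "priority").getD ""
      if p == "high" then (acc.1 ++ [r], acc.2.1, acc.2.2)
      else if p == "low" then (acc.1, acc.2.1, acc.2.2 ++ [r])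
      else (acc.1, acc.2.1 ++ [r], acc.2.2))
    ([], [], [])
  (buckets.1 ++ buckets.2.1 ++ buckets.2.2).take 10

-- ===== PRECONDITION & SPEC =====
def Spec_prioritize_questions_py (intelligent_questions : List (List (String × String))) (follow_up_questions : List String) (out : List (List (String × String))) : Prop := out = prioritize_questions_py_alt intelligent_questions follow_up_questions
instance (intelligent_questions : List (List (String × String))) (follow_up_questions : List String) (out : List (List (String × String))) : Decidable (Spec_prioritize_questions_py intelligent_questions follow_up_questions out) := by unfold Spec_prioritize_questions_py; infer_instance

-- ===== CLAIM (what is proved, stated in full; the proofs are below) =====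
def Claim_equal_prioritize_questions_py : Prop := ∀ (intelligent_questions : List (List (String × String))) (follow_up_questions : List String), Dom_prioritize_questions_py intelligent_questions follow_up_questions → Spec_prioritize_questions_py intelligent_questions follow_up_questions (prioritize_questions_py intelligent_questions follow_up_questions)

-- ===== LEMMAS AND PROOFS =====

-- the priority string of a record, as B reads it
def pvPrio (x : List (String × String)) : String := ((PySem.Dict.mk x).get? "priority").getD ""

theorem po_getD (s : String) :
    pvPriorityOrder.getD s 2 = if s == "high" then 1 else if s == "low" then 3 else 2 := by
  unfold pvPriorityOrder PySem.Dict.getD PySem.Dict.get?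
  by_cases h1 : s = "high"
  · subst h1; decide
  · by_cases h2 : s = "low"
    · subst h2; decide
    · by_cases h3 : s = "medium"
      · subst h3; decide
      · have e1 : ("high" == s) = false := beq_eq_false_iff_ne.mpr (Ne.symm h1)
        have e2 : ("low" == s) = false := beq_eq_false_iff_ne.mpr (Ne.symm h2)
        have e3 : ("medium" == s) = false := beq_eq_false_iff_ne.mpr (Ne.symm h3)
        simp [List.find?, e1, e2, e3, beq_eq_false_iff_ne.mpr h1, beq_eq_false_iff_ne.mpr h2]

theorem pvKey_eq (x : List (String × String)) :
    pvKey x = if pvPrio x == "high" then 1 else if pvPrio x == "low" then 3 else 2 :=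
  po_getD (pvPrio x)

theorem pvKey_cases (x : List (String × String)) : pvKey x = 1 ∨ pvKey x = 2 ∨ pvKey x = 3 := by
  rw [pvKey_eq]; split_ifs <;> simp

theorem foldl_append_eq_map {α β : Type} (f : α → β) (xs : List α) (init : List β) :
    xs.foldl (fun acc q => acc ++ [f q]) init = init ++ xs.map f := by
  induction xs generalizing init with
  | nil => simp
  | cons x xs ih => simp [List.foldl, ih]

theorem insertBy_all_before {α : Type} (before : α → α → Bool) (x : α) (ys : List α)
    (h : ∀ y ∈ ys, before x y = true) : PySem.List.insertBy before x ys = x :: ys := by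
  cases ys with
  | nil => rfl
  | cons y ys => simp [PySem.List.insertBy, h y (by simp)]

theorem insertBy_append_not {α : Type} (before : α → α → Bool) (x : α) (as bs : List α)
    (h : ∀ a ∈ as, before x a = false) :
    PySem.List.insertBy before x (as ++ bs) = as ++ PySem.List.insertBy before x bs := by
  induction as with
  | nil => rfl
  | cons a as ih =>
    have hfalse := h a (by simp)
    simp [PySem.List.insertBy, hfalse, ih (fun a ha => h a (by simp [ha]))]

theorem bucket_foldl (rs h m l : List (List (String × String)))
    (hh : ∀ a ∈ h, pvKey a = 1) (hm : ∀ a ∈ m, pvKey a = 2) (hl : ∀ a ∈ l, pvKey a = 3) :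
    rs.foldl (fun acc x => PySem.List.insertBy (fun a b => decide (pvKey a < pvKey b)) x acc)
      (h ++ (m ++ l))
    = (h ++ rs.filter (fun x => pvKey x == 1))
      ++ ((m ++ rs.filter (fun x => pvKey x == 2)) ++ (l ++ rs.filter (fun x => pvKey x == 3))) := by
  induction rs generalizing h m l with
  | nil => simp
  | cons r rs ih =>
    rcases pvKey_cases r with hk | hk | hk
    · have hins : PySem.List.insertBy (fun a b => decide (pvKey a < pvKey b)) r (h ++ (m ++ l))
          = (h ++ [r]) ++ (m ++ l) := by
        rw [insertBy_append_not _ _ _ _ (fun a ha => by simp [hk, hh a ha]),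
            insertBy_all_before _ _ _ (fun y hy => by
              rcases List.mem_append.mp hy with hy | hy
              · simp [hk, hm y hy]
              · simp [hk, hl y hy])]
        simp
      simp only [List.foldl_cons, hins]
      rw [ih (h ++ [r]) m l
          (fun a ha => by rcases List.mem_append.mp ha with ha | ha
                          · exact hh a ha
                          · simp_all) hm hl]
      simp [hk]
    · have hins : PySem.List.insertBy (fun a b => decide (pvKey a < pvKey b)) r (h ++ (m ++ l))
          = h ++ ((m ++ [r]) ++ l) := by
        rw [insertBy_append_not _ _ _ _ (fun a ha => by simp [hk, hh a ha])]
        rw [insertBy_append_not _ _ _ _ (fun a ha => by simp [hk, hm a ha]),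
            insertBy_all_before _ _ _ (fun y hy => by simp [hk, hl y hy])]
        simp
      simp only [List.foldl_cons, hins]
      rw [ih h (m ++ [r]) l hh
          (fun a ha => by rcases List.mem_append.mp ha with ha | ha
                          · exact hm a ha
                          · simp_all) hl]
      simp [hk]
    · have hins : PySem.List.insertBy (fun a b => decide (pvKey a < pvKey b)) r (h ++ (m ++ l))
          = h ++ (m ++ (l ++ [r])) := by
        rw [PySem.List.insertBy_of_forall_not_before _ _ _ (fun y hy => by
              rcases List.mem_append.mp hy with hy | hy
              · simp [hk, hh y hy]
              · rcases List.mem_append.mp hy with hy | hy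
                · simp [hk, hm y hy]
                · simp [hk, hl y hy])]
        simp
      simp only [List.foldl_cons, hins]
      rw [ih h m (l ++ [r]) hh hm
          (fun a ha => by rcases List.mem_append.mp ha with ha | ha
                          · exact hl a ha
                          · simp_all)]
      simp [hk]

theorem sorted_three (rs : List (List (String × String))) :
    PySem.List.sorted rs pvKey false
    = rs.filter (fun x => pvKey x == 1) ++ (rs.filter (fun x => pvKey x == 2)
      ++ rs.filter (fun x => pvKey x == 3)) := by
  rw [PySem.List.sorted_eq_foldl_insertBy]
  have := bucket_foldl rs [] [] [] (by simp) (by simp) (by simp)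
  simpa using this

theorem bucket_pass (rs : List (List (String × String)))
    (h m l : List (List (String × String))) :
    rs.foldl
      (fun (acc : List (List (String × String)) × List (List (String × String)) × List (List (String × String))) r =>
        let p := ((PySem.Dict.mk r).get? "priority").getD ""
        if p == "high" then (acc.1 ++ [r], acc.2.1, acc.2.2)
        else if p == "low" then (acc.1, acc.2.1, acc.2.2 ++ [r])
        else (acc.1, acc.2.1 ++ [r], acc.2.2)) (h, m, l)
    = (h ++ rs.filter (fun x => pvKey x == 1), m ++ rs.filter (fun x => pvKey x == 2),
       l ++ rs.filter (fun x => pvKey x == 3)) := by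
  induction rs generalizing h m l with
  | nil => simp
  | cons r rs ih =>
    simp only [List.foldl_cons]
    by_cases h1 : pvPrio r == "high"
    · have hk : pvKey r = 1 := by rw [pvKey_eq, if_pos h1]
      simp only [pvPrio] at h1
      simp only [h1, if_true]
      rw [ih (h ++ [r]) m l]
      simp [hk]
    · by_cases h2 : pvPrio r == "low"
      · have hk : pvKey r = 3 := by rw [pvKey_eq, if_neg h1, if_pos h2]
        simp only [pvPrio] at h1 h2
        simp only [h1, h2, if_true, if_false, Bool.false_eq_true]
        rw [ih h m (l ++ [r])]
        simp [hk]
      · have hk : pvKey r = 2 := by rw [pvKey_eq, if_neg h1, if_neg h2]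
        simp only [pvPrio] at h1 h2
        simp only [h1, h2, if_false, Bool.false_eq_true]
        rw [ih h (m ++ [r]) l]
        simp [hk]

-- ===== VERDICT (by name: the statement is the Claim_ definition above) =====
theorem prioritize_questions_py_spec : Claim_equal_prioritize_questions_py := by
  intro iq fq _
  unfold Spec_prioritize_questions_py prioritize_questions_py prioritize_questions_py_alt
  simp only [foldl_append_eq_map, List.nil_append, bucket_pass]
  rw [sorted_three]
  simp [List.append_assoc]
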